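-- pv_equiv track=rewrite | github.com/zaknaj/trubuild-demo-temp | engine/tools/tech_rfp/tech_rfp_evaluation_criteria_extractor.py | _group_rows_by_scope
-- ===== SOURCE A (Python) =====
-- from typing import Any, Dict, List
--
-- def _ffill_scope(
--     rows,
--     scope_keys=("Evaluation Scope", "evaluation_scope", "scope", "section", "theme"),
-- ):
--     last = None
--     for r in rows:
--         # find first present scope key
--         for k in scope_keys:
--             if k in r and str(r[k]).strip():
--                 last = r[k]
--                 break
--         else:
--             # no scope value in this row -> fill it
--             if last is not None:
--                 for k in scope_keys:
--                     if k in r and not str(r[k]).strip():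
--                         r[k] = last
--     return rows
--
-- def _group_rows_by_scope(rows: List[Dict], scope_col: str) -> Dict[str, List[Dict]]:
--     filled = _ffill_scope(list(rows), scope_keys=(scope_col,))
--     groups: Dict[str, List[Dict]] = {}
--     for r in filled:
--         val = str(r.get(scope_col, "")).strip()
--         if not val:
--             val = "Unscoped"
--         groups.setdefault(val, []).append(r)
--     return groups
-- ===== SOURCE B (Python) =====
-- _MISSING = object()
--
-- def _group_rows_by_scope(rows, scope_col):
--     # Single fused pass: forward-fill the scope column and group in one loop,
--     # no helper and no intermediate filled list. Mutates the row dicts like A.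
--     groups = {}
--     last = None
--     for r in list(rows):
--         v = r.get(scope_col, _MISSING)
--         if v is not _MISSING and str(v).strip():
--             last = v
--         elif last is not None and v is not _MISSING:
--             r[scope_col] = last
--         key = str(r.get(scope_col, "")).strip() or "Unscoped"
--         groups.setdefault(key, []).append(r)
--     return groups
-- ===== Notes on version B (the rewrite author's own statement) =====
-- stated objective: simpler
-- what changed: Replaces the separate _ffill_scope helper plus second grouping loop with one fused linear pass that carries a `last` variable and builds the groups dict directly.
import Mathlib
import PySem

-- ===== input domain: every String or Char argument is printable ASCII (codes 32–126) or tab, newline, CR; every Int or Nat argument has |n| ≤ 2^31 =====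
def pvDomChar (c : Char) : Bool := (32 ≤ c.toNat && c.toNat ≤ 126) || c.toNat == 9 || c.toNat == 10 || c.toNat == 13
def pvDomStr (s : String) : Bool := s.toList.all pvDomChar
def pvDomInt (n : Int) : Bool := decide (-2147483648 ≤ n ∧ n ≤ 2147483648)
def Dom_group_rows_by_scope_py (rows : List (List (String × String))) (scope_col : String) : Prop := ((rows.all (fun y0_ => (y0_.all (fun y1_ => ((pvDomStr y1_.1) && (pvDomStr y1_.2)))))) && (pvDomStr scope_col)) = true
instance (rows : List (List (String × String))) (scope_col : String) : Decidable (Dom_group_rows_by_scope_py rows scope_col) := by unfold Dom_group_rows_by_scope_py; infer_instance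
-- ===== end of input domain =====

-- B is the same forward-fill-then-group behaviour written as ONE fused pass
-- (a `last` variable and the groups dict maintained together), with no
-- _ffill_scope helper and no intermediate filled list. Return-value
-- equivalence only: both Pythons mutate the shared row dicts identically.

-- ===== PORT A =====
-- loop body of _ffill_scope (scope_keys = (scope_col,)): state = (last, acc)
def pvFfillStep (scope_col : String) (st : Option String × List (List (String × String)))
    (r : List (String × String)) : Option String × List (List (String × String)) :=
  let d := PySem.Dict.mk r
  match d.get? scope_col with
  | some v =>
      if PySem.Str.strip v ≠ "" then (some v, st.2 ++ [r])          -- last = r[k]; break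
      else
        match st.1 with                                             -- for-else: fill
        | some l => (st.1, st.2 ++ [(d.insert scope_col l).items])  -- r[k] = last
        | none   => (st.1, st.2 ++ [r])
  | none => (st.1, st.2 ++ [r])

-- loop body of the grouping loop: groups.setdefault(val, []).append(r)
def pvGroupStep (scope_col : String) (g : PySem.Dict String (List (List (String × String))))
    (r : List (String × String)) : PySem.Dict String (List (List (String × String))) :=
  let val := PySem.Str.strip ((PySem.Dict.mk r).getD scope_col "")
  let val := if val = "" then "Unscoped" else val
  g.modify val [] (· ++ [r])

def group_rows_by_scope_py (rows : List (List (String × String))) (scope_col : String) :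
    List (String × List (List (String × String))) :=
  let filled := (rows.foldl (pvFfillStep scope_col) (none, [])).2
  (filled.foldl (pvGroupStep scope_col) PySem.Dict.empty).items

-- ===== PORT B =====
-- loop body of B's single fused pass: state = (last, groups)
def pvFusedStep (scope_col : String)
    (st : Option String × PySem.Dict String (List (List (String × String))))
    (r : List (String × String)) :
    Option String × PySem.Dict String (List (List (String × String))) :=
  let d := PySem.Dict.mk r
  let p : Option String × List (String × String) :=
    match d.get? scope_col with
    | some v =>
        if PySem.Str.strip v ≠ "" then (some v, r)                  -- last = v
        else
          match st.1 with
          | some l => (st.1, (d.insert scope_col l).items)          -- r[scope_col] = last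
          | none   => (st.1, r)
    | none => (st.1, r)
  let key := PySem.Str.strip ((PySem.Dict.mk p.2).getD scope_col "")
  let key := if key = "" then "Unscoped" else key
  (p.1, st.2.modify key [] (· ++ [p.2]))                            -- setdefault(...).append

def group_rows_by_scope_py_alt (rows : List (List (String × String))) (scope_col : String) :
    List (String × List (List (String × String))) :=
  (rows.foldl (pvFusedStep scope_col) (none, PySem.Dict.empty)).2.items

-- ===== PRECONDITION & SPEC =====
def Spec_group_rows_by_scope_py (rows : List (List (String × String))) (scope_col : String) (out : List (String × List (List (String × String)))) : Prop := out = group_rows_by_scope_py_alt rows scope_col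
instance (rows : List (List (String × String))) (scope_col : String) (out : List (String × List (List (String × String)))) : Decidable (Spec_group_rows_by_scope_py rows scope_col out) := by unfold Spec_group_rows_by_scope_py; infer_instance

-- ===== CLAIM (what is proved, stated in full; the proofs are below) =====
def Claim_equal_group_rows_by_scope_py : Prop := ∀ (rows : List (List (String × String))) (scope_col : String), Dom_group_rows_by_scope_py rows scope_col → Spec_group_rows_by_scope_py rows scope_col (group_rows_by_scope_py rows scope_col)

-- ===== LEMMAS AND PROOFS =====

-- the new `last` after one row (shared by both step functions)
def pvNewLast (scope_col : String) (last : Option String) (r : List (String × String)) : Option String :=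
  match (PySem.Dict.mk r).get? scope_col with
  | some v => if PySem.Str.strip v ≠ "" then some v else last
  | none => last

-- the (possibly filled) row emitted for input row r
def pvNewRow (scope_col : String) (last : Option String) (r : List (String × String)) : List (String × String) :=
  match (PySem.Dict.mk r).get? scope_col with
  | some v =>
      if PySem.Str.strip v ≠ "" then r
      else match last with
           | some l => ((PySem.Dict.mk r).insert scope_col l).items
           | none => r
  | none => r

theorem pvFfillStep_eq (c : String) (st : Option String × List (List (String × String)))
    (r : List (String × String)) :
    pvFfillStep c st r = (pvNewLast c st.1 r, st.2 ++ [pvNewRow c st.1 r]) := by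
  rcases h : (PySem.Dict.mk r).get? c with _ | v <;>
    simp only [pvFfillStep, pvNewLast, pvNewRow, h]
  split_ifs with hv
  · rfl
  · cases st.1 <;> rfl

theorem pvFusedStep_eq (c : String)
    (st : Option String × PySem.Dict String (List (List (String × String))))
    (r : List (String × String)) :
    pvFusedStep c st r = (pvNewLast c st.1 r, pvGroupStep c st.2 (pvNewRow c st.1 r)) := by
  rcases h : (PySem.Dict.mk r).get? c with _ | v <;>
    simp only [pvFusedStep, pvNewLast, pvNewRow, pvGroupStep, h]
  by_cases hv : PySem.Str.strip v ≠ ""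
  · simp only [if_pos hv]
  · simp only [if_neg hv]
    cases st.1 <;> rfl

-- the accumulator of the ffill fold only ever grows on the right
theorem ffill_foldl_acc (c : String) (rows : List (List (String × String)))
    (last : Option String) (acc : List (List (String × String))) :
    rows.foldl (pvFfillStep c) (last, acc)
      = ((rows.foldl (pvFfillStep c) (last, [])).1,
         acc ++ (rows.foldl (pvFfillStep c) (last, [])).2) := by
  induction rows generalizing last acc with
  | nil => simp [List.foldl]
  | cons r rows ih =>
    simp only [List.foldl, pvFfillStep_eq]
    rw [ih (pvNewLast c last r) (acc ++ [pvNewRow c last r]),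
        ih (pvNewLast c last r) ([] ++ [pvNewRow c last r])]
    simp

-- fusion: grouping the filled list = the single fused fold
theorem fused_eq (c : String) (rows : List (List (String × String)))
    (last : Option String) (g : PySem.Dict String (List (List (String × String)))) :
    ((rows.foldl (pvFfillStep c) (last, [])).2).foldl (pvGroupStep c) g
      = (rows.foldl (pvFusedStep c) (last, g)).2 := by
  induction rows generalizing last g with
  | nil => rfl
  | cons r rows ih =>
    simp only [List.foldl, pvFfillStep_eq, pvFusedStep_eq]
    rw [ffill_foldl_acc c rows (pvNewLast c last r) ([] ++ [pvNewRow c last r])]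
    simp only [List.nil_append, List.singleton_append, List.foldl_cons]
    rw [← ih (pvNewLast c last r) (pvGroupStep c g (pvNewRow c last r))]

-- ===== VERDICT (by name: the statement is the Claim_ definition above) =====
theorem group_rows_by_scope_py_spec : Claim_equal_group_rows_by_scope_py := by
  intro rows scope_col _
  show (List.foldl (pvGroupStep scope_col) PySem.Dict.empty
      ((rows.foldl (pvFfillStep scope_col) (none, [])).2)).items
    = (rows.foldl (pvFusedStep scope_col) (none, PySem.Dict.empty)).2.items
  rw [fused_eq]
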